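-- pv_equiv track=rewrite | github.com/Nadya7n/epam_homework_2021 | homework1/task2/check_fib.py | check_fibonacci
-- ===== SOURCE A (Python) =====
-- from typing import Sequence
--
-- def fibonacci(start):
--     first, second = 0, 1
--     while True:
--         if first >= start:
--             yield first
--         first, second = second, first + second
--
-- def check_fibonacci(data: Sequence[int]) -> bool:
--     if not data:
--         return False
--     else:
--         if all([isinstance(i, int) for i in data]):
--             for values_from_data, from_fibonacci in zip(data, fibonacci(data[0])):
--                 if values_from_data != from_fibonacci:
--                     return False
--             return True
--         else:
--             return False
-- ===== SOURCE B (Python) =====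
-- def check_fibonacci(data) -> bool:
--     if not data:
--         return False
--     if not all(isinstance(i, int) for i in data):
--         return False
--     a, b = 0, 1
--     while a < data[0]:
--         a, b = b, a + b
--     if data[0] != a:
--         return False
--     if len(data) > 1 and data[1] != b:
--         return False
--     return all(x + y == z for x, y, z in zip(data, data[1:], data[2:]))
-- ===== Notes on version B (the rewrite author's own statement) =====
-- stated objective: alternative
-- what changed: Instead of zip-comparing data against an independently generated Fibonacci stream, B seeks the first Fibonacci pair (a,b) with a at least the first element once, anchors the first element to a and the second to b, and then verifies the list's own recurrence (each element equals the sum of the previous two) in one pass over triples.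
import Mathlib
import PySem

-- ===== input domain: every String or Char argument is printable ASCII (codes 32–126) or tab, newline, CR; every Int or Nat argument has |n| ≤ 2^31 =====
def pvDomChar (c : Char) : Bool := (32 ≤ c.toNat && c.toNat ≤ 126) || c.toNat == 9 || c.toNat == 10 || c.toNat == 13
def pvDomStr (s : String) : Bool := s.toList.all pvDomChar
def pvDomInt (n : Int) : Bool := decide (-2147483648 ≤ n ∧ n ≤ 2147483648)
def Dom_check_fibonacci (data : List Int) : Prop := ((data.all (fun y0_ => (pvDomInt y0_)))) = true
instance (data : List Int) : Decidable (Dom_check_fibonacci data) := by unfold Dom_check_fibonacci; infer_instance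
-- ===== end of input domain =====

-- B anchors the first two values against the first Fibonacci pair ≥ data[0] and then
-- checks the data's own recurrence, instead of zip-comparing against a generated stream.

-- ===== PORT A =====
-- first data.length yields of the generator fibonacci(start) from state (first, second) = (a, b).
-- The 'b ≤ 0' branch is a totality guard only: it is unreachable from the initial state (0, 1).
def fibStream (start a b : Int) : Nat → List Int
  | 0 => []
  | n + 1 =>
    if start ≤ a then a :: fibStream start b (a + b) n
    else if b ≤ 0 then []
    else fibStream start b (a + b) (n + 1)
  termination_by n => (n, (start - a).toNat + (start - b).toNat)
  decreasing_by
    · exact Prod.Lex.left _ _ (Nat.lt_succ_self n)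
    · exact Prod.Lex.right _ (by omega)

def check_fibonacci (data : List Int) : Bool :=
  match data with
  | [] => false
  | d0 :: _ =>
    -- all([isinstance(i, int) for i in data]) is True for every well-typed List Int
    if data.all (fun _ => true) then
      ((data.zip (fibStream d0 0 1 data.length)).all fun p => p.1 == p.2)
    else false

-- ===== PORT B =====
-- while a < data[0]: a, b = b, a + b   (the 'b ≤ 0' branch is a totality guard, unreachable from (0, 1))
def fibSeek (start a b : Int) : Int × Int :=
  if start ≤ a then (a, b)
  else if b ≤ 0 then (a, b)
  else fibSeek start b (a + b)
  termination_by ((start - a).toNat + (start - b).toNat)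
  decreasing_by omega

def check_fibonacci_alt (data : List Int) : Bool :=
  match data with
  | [] => false
  | d0 :: rest =>
    let ab := fibSeek d0 0 1
    if d0 != ab.1 then false
    else if (match rest with | [] => false | d1 :: _ => d1 != ab.2) then false
    else ((data.zip (data.drop 1)).zip (data.drop 2)).all fun t => t.1.1 + t.1.2 == t.2

-- ===== PRECONDITION & SPEC =====
def Spec_check_fibonacci (data : List Int) (out : Bool) : Prop := out = check_fibonacci_alt data
instance (data : List Int) (out : Bool) : Decidable (Spec_check_fibonacci data out) := by unfold Spec_check_fibonacci; infer_instance

-- ===== CLAIM (what is proved, stated in full; the proofs are below) =====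
def Claim_equal_check_fibonacci : Prop := ∀ (data : List Int), Dom_check_fibonacci data → Spec_check_fibonacci data (check_fibonacci data)

-- ===== LEMMAS AND PROOFS =====


-- ===== LEMMAS AND PROOFS =====

-- data element-wise equal to the pure pair-recurrence stream seeded (a, b)
def matchStream : List Int → Int → Int → Bool
  | [], _, _ => true
  | x :: xs, a, b => (x == a) && matchStream xs b (a + b)

-- data's own recurrence check seeded by the previous two values p, q
def recCheck : Int → Int → List Int → Bool
  | _, _, [] => true
  | p, q, x :: xs => (x == p + q) && recCheck q x xs

theorem fibStream_of_le (data : List Int) : ∀ (start a b : Int), start ≤ a → 0 ≤ a → a ≤ b →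
    ((data.zip (fibStream start a b data.length)).all fun p => p.1 == p.2) = matchStream data a b := by
  induction data with
  | nil => intro start a b _ _ _; simp [matchStream]
  | cons x xs ih =>
    intro start a b h1 h2 h3
    rw [show (x :: xs).length = xs.length + 1 from rfl, fibStream, if_pos h1]
    simp only [List.zip_cons_cons, List.all_cons, matchStream]
    rw [ih start b (a + b) (by omega) (by omega) (by omega)]

theorem fibStream_seek (data : List Int) : ∀ (start a b : Int), 0 ≤ a → a ≤ b → 1 ≤ b →
    ((data.zip (fibStream start a b data.length)).all fun p => p.1 == p.2)
      = matchStream data (fibSeek start a b).1 (fibSeek start a b).2 := by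
  intro start a b
  fun_induction fibSeek start a b with
  | case1 a b h =>
    intro h0 hab hb
    exact fibStream_of_le data start a b h h0 hab
  | case2 a b h hb =>
    intro _ _ hb1; omega
  | case3 a b h hb ih =>
    intro h0 hab hb1
    have hstep : ∀ n, fibStream start a b n = fibStream start b (a + b) n := fun n => by
      cases n with
      | zero => simp [fibStream]
      | succ m => rw [fibStream, if_neg h, if_neg hb]
    rw [hstep data.length]
    exact ih (by omega) (by omega) (by omega)

theorem recCheck_zip3 : ∀ (l : List Int) (p q : Int),
    ((((p :: q :: l).zip (q :: l)).zip l).all fun t => t.1.1 + t.1.2 == t.2) = recCheck p q l := by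
  intro l
  induction l with
  | nil => intro p q; rfl
  | cons x xs ih =>
    intro p q
    simp only [List.zip_cons_cons, List.all_cons, recCheck] at ih ⊢
    rw [ih q x]
    have hc : ((p + q : Int) == x) = (x == p + q) := by
      by_cases h : x = p + q
      · rw [h]
      · have h1 : ((p + q : Int) == x) = false := by simpa using fun hh => h hh.symm
        have h2 : (x == p + q) = false := by simpa using h
        rw [h1, h2]
    rw [hc]

theorem matchStream_recCheck : ∀ (l : List Int) (p q : Int),
    matchStream l (p + q) (q + (p + q)) = recCheck p q l := by
  intro l
  induction l with
  | nil => intro p q; rfl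
  | cons x xs ih =>
    intro p q
    simp only [matchStream, recCheck]
    by_cases h : x = p + q
    · subst h; rw [ih q (p + q)]
    · have hf : (x == p + q) = false := by simpa using h
      rw [hf]; rfl

-- ===== VERDICT (by name: the statement is the Claim_ definition above) =====
theorem check_fibonacci_spec : Claim_equal_check_fibonacci := by
  intro data _
  unfold Spec_check_fibonacci
  cases data with
  | nil => rfl
  | cons d0 rest =>
    simp only [check_fibonacci, check_fibonacci_alt]
    rw [if_pos (by simp)]
    rw [fibStream_seek (d0 :: rest) d0 0 1 (by omega) (by omega) (by omega)]
    generalize fibSeek d0 0 1 = ab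
    obtain ⟨a', b'⟩ := ab
    cases rest with
    | nil =>
      by_cases h : d0 = a' <;> simp [matchStream, h]
    | cons d1 rest2 =>
      simp only [matchStream, List.drop_succ_cons, List.drop_zero]
      rw [recCheck_zip3 rest2 d0 d1]
      by_cases h0 : d0 = a'
      · by_cases h1 : d1 = b'
        · subst h0; subst h1
          rw [matchStream_recCheck rest2 d0 d1]
          simp
        · simp [h0, h1, bne_iff_ne]
      · simp [h0, bne_iff_ne]
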